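-- pv_equiv track=rewrite | github.com/EtienneBoutet/IFT615_TP4 | solution_pourriels.py | creerVocabulaire
-- ===== SOURCE A (Python) =====
-- from collections import defaultdict
--
-- def creerVocabulaire(documents, seuil):
--
--     d = defaultdict(int)
--
--     for document in documents:
--         for word in document.split():
--             d[word] += 1
--
--     voc_words = set()
--
--     for key, value in d.items():
--         if value >= seuil:
--             voc_words.add(key)
--
--     return voc_words
-- ===== SOURCE B (Python) =====
-- def creerVocabulaire(documents, seuil):
--     # No frequency dictionary: scan the flattened word stream and, at each
--     # word's first occurrence, count its occurrences directly in the stream.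
--     words = [w for document in documents for w in document.split()]
--     seen = set()
--     voc = set()
--     for w in words:
--         if w not in seen:
--             seen.add(w)
--             if words.count(w) >= seuil:
--                 voc.add(w)
--     return voc
-- ===== Notes on version B (the rewrite author's own statement) =====
-- stated objective: alternative
-- what changed: Removes the frequency dictionary and the second pass over d.items() entirely: B flattens the documents into one word stream and, at each word's first occurrence (tracked by a seen-set), counts its occurrences directly in the stream with list.count, adding it to the vocabulary if the count reaches seuil.
import Mathlib
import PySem

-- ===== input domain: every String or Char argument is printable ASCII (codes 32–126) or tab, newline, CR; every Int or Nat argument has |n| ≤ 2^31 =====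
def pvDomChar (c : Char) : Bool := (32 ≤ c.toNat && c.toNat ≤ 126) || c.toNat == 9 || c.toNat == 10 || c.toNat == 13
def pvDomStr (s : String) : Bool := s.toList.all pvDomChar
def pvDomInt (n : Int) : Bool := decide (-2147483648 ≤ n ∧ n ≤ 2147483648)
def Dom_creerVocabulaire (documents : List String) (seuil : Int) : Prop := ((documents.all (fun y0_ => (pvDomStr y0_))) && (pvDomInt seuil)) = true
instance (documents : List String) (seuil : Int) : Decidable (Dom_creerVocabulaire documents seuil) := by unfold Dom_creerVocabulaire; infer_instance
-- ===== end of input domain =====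

-- B drops the frequency dictionary and the items() pass: it scans the flattened word
-- stream and counts each word directly (list.count) at its first occurrence (alternative).

-- ===== PORT A =====
-- d = defaultdict(int); for document in documents: for word in document.split(): d[word] += 1
-- voc_words = set(); for key, value in d.items(): if value >= seuil: voc_words.add(key)
def creerVocabulaire (documents : List String) (seuil : Int) : List String :=
  let d : PySem.Dict String Int :=
    documents.foldl
      (fun d document =>
        (PySem.Str.split₀ document).foldl (fun d word => d.modify word 0 (· + 1)) d)
      PySem.Dict.empty
  d.items.foldl
    (fun voc_words kv => if kv.2 ≥ seuil then PySem.Set.add voc_words kv.1 else voc_words)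
    PySem.Set.empty

-- ===== PORT B =====
-- words = [w for document in documents for w in document.split()]
-- seen = set(); voc = set()
-- for w in words:
--     if w not in seen:
--         seen.add(w)
--         if words.count(w) >= seuil: voc.add(w)
-- return voc
def creerVocabulaire_alt (documents : List String) (seuil : Int) : List String :=
  let words := documents.flatMap PySem.Str.split₀
  (words.foldl
    (fun sv w =>
      if PySem.Set.contains sv.1 w = false then
        (PySem.Set.add sv.1 w,
         if (PySem.List.count words w : Int) ≥ seuil then PySem.Set.add sv.2 w else sv.2)
      else sv)
    (PySem.Set.empty, PySem.Set.empty)).2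

-- ===== PRECONDITION & SPEC =====
def Spec_creerVocabulaire (documents : List String) (seuil : Int) (out : List String) : Prop := out = creerVocabulaire_alt documents seuil
instance (documents : List String) (seuil : Int) (out : List String) : Decidable (Spec_creerVocabulaire documents seuil out) := by unfold Spec_creerVocabulaire; infer_instance

-- ===== CLAIM (what is proved, stated in full; the proofs are below) =====
def Claim_equal_creerVocabulaire : Prop := ∀ (documents : List String) (seuil : Int), Dom_creerVocabulaire documents seuil → Spec_creerVocabulaire documents seuil (creerVocabulaire documents seuil)

-- ===== LEMMAS AND PROOFS =====

-- B's loop: the seen-component is plain Set accumulation, and the voc-component is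
-- always the P-filter of the seen-component.
lemma pvB_loop {P : String → Prop} [DecidablePred P] (l : List String)
    (seen voc : PySem.Set String)
    (h : voc = seen.filter (fun w => decide (P w))) :
    l.foldl
      (fun (sv : PySem.Set String × PySem.Set String) w =>
        if PySem.Set.contains sv.1 w = false then
          (PySem.Set.add sv.1 w, if P w then PySem.Set.add sv.2 w else sv.2)
        else sv)
      (seen, voc)
    = (l.foldl PySem.Set.add seen,
       (l.foldl PySem.Set.add seen).filter (fun w => decide (P w))) := by
  induction l generalizing seen voc with
  | nil => simp [h]
  | cons w rest ih =>
    simp only [List.foldl_cons]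
    by_cases hc : PySem.Set.contains seen w = false
    · rw [if_pos hc]
      have hnm : w ∉ seen := by
        simpa [PySem.Set.contains] using hc
      have hadd : PySem.Set.add seen w = seen ++ [w] := by
        simp [PySem.Set.add, hnm]
      have hv : (if P w then PySem.Set.add voc w else voc)
          = (PySem.Set.add seen w).filter (fun w => decide (P w)) := by
        have hvnm : w ∉ voc := by
          intro hw; exact hnm (List.mem_of_mem_filter (h ▸ hw))
        have hvadd : PySem.Set.add voc w = voc ++ [w] := by
          simp [PySem.Set.add, hvnm]
        rw [hadd, hvadd, List.filter_append, h]
        by_cases hp : P w <;> simp [hp]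
      rw [hv]; exact ih _ _ rfl
    · rw [if_neg hc]
      have hs : PySem.Set.add seen w = seen := by
        have hm : w ∈ seen := by
          simp only [Bool.not_eq_false] at hc; simpa using hc
        simp [PySem.Set.add, hm]
      rw [hs]; exact ih _ _ h

-- A's filtering loop over a list is Set accumulation of the filtered list.
lemma pvA_loop {P : String → Prop} [DecidablePred P] (l : List String)
    (acc : PySem.Set String) :
    l.foldl (fun voc k => if P k then PySem.Set.add voc k else voc) acc
    = (l.filter (fun w => decide (P w))).foldl PySem.Set.add acc := by
  induction l generalizing acc with
  | nil => rfl
  | cons w rest ih =>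
    by_cases hp : P w <;> simp [hp, ih]

-- Accumulating a Nodup list of fresh elements just appends it.
lemma pvAdd_fresh (l : List String) (acc : PySem.Set String)
    (hfresh : ∀ x ∈ l, x ∉ acc) (hnd : l.Nodup) :
    l.foldl PySem.Set.add acc = acc ++ l := by
  induction l generalizing acc with
  | nil => simp
  | cons w rest ih =>
    have hw : w ∉ acc := hfresh w (by simp)
    have hadd : PySem.Set.add acc w = acc ++ [w] := by
      simp [PySem.Set.add, hw]
    simp only [List.foldl_cons, hadd]
    rw [ih (acc ++ [w])
      (by intro x hx; simp only [List.mem_append, List.mem_singleton]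
          push Not
          exact ⟨hfresh x (by simp [hx]), by rintro rfl; exact (List.nodup_cons.mp hnd).1 hx⟩)
      (List.nodup_cons.mp hnd).2]
    simp

-- ===== VERDICT (by name: the statement is the Claim_ definition above) =====
theorem creerVocabulaire_spec : Claim_equal_creerVocabulaire := by
  intro documents seuil _
  unfold Spec_creerVocabulaire creerVocabulaire creerVocabulaire_alt
  dsimp only
  simp only [PySem.List.count_eq]
  set ws := documents.flatMap PySem.Str.split₀ with hws
  -- A's dict is Counter(ws)
  have hd : documents.foldl
      (fun d document =>
        (PySem.Str.split₀ document).foldl (fun d word => d.modify word 0 (· + 1)) d)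
      PySem.Dict.empty = PySem.Dict.counter ws := by
    simp [PySem.Dict.counter, hws, List.foldl_flatMap]
  apply Eq.trans ?_
    (congrArg Prod.snd
      (pvB_loop (P := fun w => ((ws.count w : Int) ≥ seuil)) ws
        PySem.Set.empty PySem.Set.empty rfl)).symm
  dsimp only
  rw [hd, PySem.Dict.items_counter, List.foldl_map]
  dsimp only
  apply Eq.trans (pvA_loop (P := fun k => ((ws.count k : Int) ≥ seuil)) _ _)
  rw [pvAdd_fresh _ _ (by simp [PySem.Set.empty])
      ((PySem.Set.nodup_ofList ws).filter _)]
  rw [show ws.foldl PySem.Set.add PySem.Set.empty = PySem.Set.ofList ws from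
    (PySem.Set.ofList_eq_foldl ws).symm]
  simp [PySem.Set.empty]
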